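-- pv_equiv track=rewrite | github.com/yukw777/temporal-discrete-graph-updater | tdgu/graph.py | update_rdf_graph
-- ===== SOURCE A (Python) =====
-- from typing import Dict, List, Any, Set
--
-- def update_rdf_graph(rdfs: Set[str], graph_cmds: List[str]) -> Set[str]:
--     """
--     Update the given RDF triple graph using the given graph commands.
--
--     We remove duplicate graph commands while preserving order.
--
--     Since Python 3.7, dict is guaranteed to keep insertion order.
--     """
--     graph_cmds = list(dict.fromkeys(graph_cmds))
--     for cmd in graph_cmds:
--         verb, src, dst, relation = cmd.split(" , ")
--         rdf = " , ".join([src, dst, relation])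
--         if verb == "add" and rdf not in rdfs:
--             rdfs.add(rdf)
--         elif verb == "delete" and rdf in rdfs:
--             rdfs.remove(rdf)
--     return rdfs
-- ===== SOURCE B (Python) =====
-- def update_rdf_graph(rdfs, graph_cmds):
--     """Classify-then-apply: one scan records, per RDF triple, whether it has a
--     delete command and whether its first add comes after a delete ("last
--     effective command wins"); the graph is then updated with one set difference
--     and one bulk union instead of applying the commands one by one.
--     Mutates and returns the same rdfs set, like the original."""
--     first_add = {}  # rdf -> True iff a delete for rdf was seen before its first add
--     first_del = set()  # rdfs that have a delete command
--     for cmd in graph_cmds: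
--         verb, src, dst, relation = cmd.split(" , ")
--         rdf = " , ".join([src, dst, relation])
--         if verb == "add" and rdf not in first_add:
--             first_add[rdf] = rdf in first_del
--         elif verb == "delete":
--             first_del.add(rdf)
--     appended = [r for r, deleted_before in first_add.items()
--                 if deleted_before or (r not in first_del and r not in rdfs)]
--     rdfs.difference_update(first_del)
--     rdfs.update(appended)
--     return rdfs
-- ===== Notes on version B (the rewrite author's own statement) =====
-- stated objective: alternative
-- what changed: Replaces the dedup-then-sequentially-apply loop by a classification pass: one scan records per triple whether it has a delete and whether its first add follows a delete (last effective command wins), then the graph is updated wholesale with one set difference and one bulk union, never applying commands one at a time.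
import Mathlib
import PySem

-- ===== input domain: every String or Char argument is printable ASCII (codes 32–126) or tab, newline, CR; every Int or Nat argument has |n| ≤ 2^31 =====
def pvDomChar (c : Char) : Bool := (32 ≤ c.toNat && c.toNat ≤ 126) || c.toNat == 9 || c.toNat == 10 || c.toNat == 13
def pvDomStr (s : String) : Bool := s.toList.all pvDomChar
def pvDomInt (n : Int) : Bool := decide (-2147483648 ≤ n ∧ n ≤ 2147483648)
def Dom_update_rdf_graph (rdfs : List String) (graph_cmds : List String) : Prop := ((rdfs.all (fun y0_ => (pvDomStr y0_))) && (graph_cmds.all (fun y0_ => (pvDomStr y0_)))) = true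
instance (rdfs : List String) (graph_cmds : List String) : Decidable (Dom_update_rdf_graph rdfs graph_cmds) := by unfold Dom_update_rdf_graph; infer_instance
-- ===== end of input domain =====

-- B replaces A's dedup-then-sequentially-apply loop by a classification pass (per triple:
-- has it a delete? does its first add follow a delete?) and one wholesale difference + union
-- ('alternative'); both Pythons mutate the rdfs set in place, the claim is about the RETURN value only.

-- ===== PORT A =====
-- one iteration of A's loop body
def pvApplyA (rdfs : List String) (cmd : String) : List String :=
  match PySem.Str.split? cmd " , " with
  | some [verb, src, dst, relation] =>
    let rdf := PySem.Str.join " , " [src, dst, relation]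
    if verb == "add" && !(PySem.Set.contains rdfs rdf) then PySem.Set.add rdfs rdf
    else if verb == "delete" && PySem.Set.contains rdfs rdf then
      (PySem.Set.remove? rdfs rdf).getD rdfs
    else rdfs
  | _ => rdfs  -- Python raises ValueError (tuple unpack) here; excluded by Pre_

def update_rdf_graph (rdfs : List String) (graph_cmds : List String) : List String :=
  (PySem.List.dedup graph_cmds).foldl pvApplyA rdfs

-- ===== PORT B =====
-- one iteration of B's scan; state = (first_add, first_del)
def pvScanB (st : PySem.Dict String Bool × PySem.Set String) (cmd : String) :
    PySem.Dict String Bool × PySem.Set String :=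
  match PySem.Str.split? cmd " , " with
  | some [verb, src, dst, relation] =>
    let rdf := PySem.Str.join " , " [src, dst, relation]
    if verb == "add" && !(st.1.contains rdf) then
      (st.1.insert rdf (PySem.Set.contains st.2 rdf), st.2)
    else if verb == "delete" then (st.1, PySem.Set.add st.2 rdf)
    else st
  | _ => st  -- Python raises ValueError (tuple unpack) here; excluded by Pre_

def update_rdf_graph_alt (rdfs : List String) (graph_cmds : List String) : List String :=
  let st := graph_cmds.foldl pvScanB (PySem.Dict.empty, PySem.Set.empty)
  let appended := (st.1.items.filter (fun p =>
      p.2 || (!(PySem.Set.contains st.2 p.1) && !(PySem.Set.contains rdfs p.1)))).map Prod.fst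
  PySem.Set.update (PySem.Set.diff rdfs st.2) appended

-- ===== PRECONDITION & SPEC =====
-- Pre_ excludes exactly the inputs on which A raises ValueError: a command that does not
-- split on " , " into exactly four fields.
def Pre_update_rdf_graph (rdfs : List String) (graph_cmds : List String) : Prop :=
  ∀ cmd ∈ graph_cmds, ((PySem.Str.split? cmd " , ").getD []).length = 4
instance (rdfs : List String) (graph_cmds : List String) : Decidable (Pre_update_rdf_graph rdfs graph_cmds) := by unfold Pre_update_rdf_graph; infer_instance

def pvWitness_update_rdf_graph : List String × List String :=
  (["a , b , c"], ["add , d , e , f", "delete , a , b , c", "add , d , e , f"])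

def Spec_update_rdf_graph (rdfs : List String) (graph_cmds : List String) (out : List String) : Prop := out = update_rdf_graph_alt rdfs graph_cmds
instance (rdfs : List String) (graph_cmds : List String) (out : List String) : Decidable (Spec_update_rdf_graph rdfs graph_cmds out) := by unfold Spec_update_rdf_graph; infer_instance

-- ===== CLAIM (what is proved, stated in full; the proofs are below) =====
def Claim_equal_update_rdf_graph : Prop := ∀ (rdfs : List String) (graph_cmds : List String), Dom_update_rdf_graph rdfs graph_cmds → Pre_update_rdf_graph rdfs graph_cmds → Spec_update_rdf_graph rdfs graph_cmds (update_rdf_graph rdfs graph_cmds)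

-- ===== LEMMAS AND PROOFS =====

-- cmd ↦ (verb, rdf) when the command splits into exactly four fields
def pvParse (c : String) : Option (String × String) :=
  match PySem.Str.split? c " , " with
  | some [v, s, d, r] => some (v, PySem.Str.join " , " [s, d, r])
  | _ => none

-- is there a delete command for r in E?
def pvHasDel (r : String) (E : List String) : Bool :=
  E.any (fun c => pvParse c == some ("delete", r))

-- the elements A's loop appends (in order), given current set S
def pvAppends : List String → List String → List String
  | _, [] => []
  | S, c :: E =>
    (match pvParse c with
     | some (v, r) =>
       if v == "add" && !pvHasDel r E && !(PySem.Set.contains S r) then [r] else []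
     | none => []) ++ pvAppends (pvApplyA S c) E

-- first occurrences of cs not already in seen, in order
def pvDedupFrom (seen : List String) : List String → List String
  | [] => []
  | c :: cs =>
    if PySem.Set.contains seen c then pvDedupFrom seen cs
    else c :: pvDedupFrom (PySem.Set.add seen c) cs

-- the rdf of an add command, none otherwise
def pvAddSel (c : String) : Option String :=
  (pvParse c).bind (fun p => if p.1 == "add" then some p.2 else none)

-- the rdfs of the add commands of E, in order
def pvAddKeys (E : List String) : List String :=
  E.filterMap pvAddSel

-- first_add as a pure function of the delete-set accumulator
def pvFaList : PySem.Set String → List String → List (String × Bool)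
  | _, [] => []
  | fd, c :: E =>
    match pvParse c with
    | some (v, r) =>
      if v == "add" then (r, PySem.Set.contains fd r) :: pvFaList fd E
      else if v == "delete" then pvFaList (PySem.Set.add fd r) E
      else pvFaList fd E
    | none => pvFaList fd E

lemma pvPairBeq (a b c d : String) : ((a, b) == (c, d)) = (a == c && b == d) := rfl

lemma pvSomeBeq (x y : String × String) :
    ((some x : Option (String × String)) == some y) = (x == y) := rfl

lemma pvFoldlAdd (cs : List String) : ∀ seen : List String,
    cs.foldl PySem.Set.add seen = seen ++ pvDedupFrom seen cs := by
  induction cs with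
  | nil => intro seen; simp [pvDedupFrom]
  | cons c cs ih =>
    intro seen
    rw [List.foldl_cons, ih]
    by_cases h : c ∈ seen
    · rw [PySem.Set.add_of_mem h]
      simp [pvDedupFrom, h]
    · rw [PySem.Set.add_of_not_mem h]
      simp [pvDedupFrom, h]

lemma pvDedupEq (cs : List String) : PySem.List.dedup cs = pvDedupFrom [] cs := by
  rw [PySem.List.dedup_eq_ofList, PySem.Set.ofList_eq_foldl, pvFoldlAdd]
  simp

-- ---- bridges from the ports' split-match to pvParse ----

lemma pvApplyA_of_parse_none (S : List String) (c : String) (h : pvParse c = none) :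
    pvApplyA S c = S := by
  rcases hs : PySem.Str.split? c " , " with _ | ⟨_ | ⟨v, _ | ⟨s, _ | ⟨d, _ | ⟨r, _ | ⟨x, t⟩⟩⟩⟩⟩⟩ <;>
    simp [pvApplyA, hs]
  simp [pvParse, hs] at h

lemma pvApplyA_of_parse_some (S : List String) (c v w : String) (h : pvParse c = some (v, w)) :
    pvApplyA S c =
      if v == "add" && !(PySem.Set.contains S w) then PySem.Set.add S w
      else if v == "delete" && PySem.Set.contains S w then (PySem.Set.remove? S w).getD S
      else S := by
  rcases hs : PySem.Str.split? c " , " with _ | ⟨_ | ⟨v', _ | ⟨s, _ | ⟨d, _ | ⟨r, _ | ⟨x, t⟩⟩⟩⟩⟩⟩ <;>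
    simp [pvParse, hs] at h
  obtain ⟨rfl, rfl⟩ := h
  simp [pvApplyA, hs]

lemma pvScanB_of_parse_none (st : PySem.Dict String Bool × PySem.Set String) (c : String)
    (h : pvParse c = none) : pvScanB st c = st := by
  rcases hs : PySem.Str.split? c " , " with _ | ⟨_ | ⟨v, _ | ⟨s, _ | ⟨d, _ | ⟨r, _ | ⟨x, t⟩⟩⟩⟩⟩⟩ <;>
    simp [pvScanB, hs]
  simp [pvParse, hs] at h

lemma pvScanB_of_parse_some (st : PySem.Dict String Bool × PySem.Set String) (c v w : String)
    (h : pvParse c = some (v, w)) :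
    pvScanB st c =
      if v == "add" && !(st.1.contains w) then
        (st.1.insert w (PySem.Set.contains st.2 w), st.2)
      else if v == "delete" then (st.1, PySem.Set.add st.2 w)
      else st := by
  rcases hs : PySem.Str.split? c " , " with _ | ⟨_ | ⟨v', _ | ⟨s, _ | ⟨d, _ | ⟨r, _ | ⟨x, t⟩⟩⟩⟩⟩⟩ <;>
    simp [pvParse, hs] at h
  obtain ⟨rfl, rfl⟩ := h
  simp [pvScanB, hs]

-- ---- split/join roundtrip: a command is its verb, the separator and its rdf ----

lemma pvJoinSnoc (sep : List Char) (ys : List (List Char)) (x : List Char) :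
    PySem.Chars.join sep (ys ++ [x]) =
      PySem.Chars.join sep ys ++ (if ys.isEmpty then [] else sep) ++ x := by
  induction ys with
  | nil => simp [PySem.Chars.join_singleton, PySem.Chars.join_nil]
  | cons y ys ih =>
    cases ys with
    | nil =>
      simp [PySem.Chars.join_cons_cons, PySem.Chars.join_singleton]
    | cons z zs =>
      simp only [List.cons_append, PySem.Chars.join_cons_cons, List.isEmpty_cons] at ih ⊢
      rw [ih]
      simp [List.append_assoc]

lemma pvGoInv (sep : List Char) : ∀ (fuel : Nat) (l cur : List Char) (acc : List (List Char)),
    PySem.Chars.join sep (PySem.Chars.splitOn.go sep fuel l cur acc) =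
      PySem.Chars.join sep acc.reverse ++ (if acc.isEmpty then [] else sep) ++ cur.reverse ++ l := by
  intro fuel
  induction fuel with
  | zero =>
    intro l cur acc
    simp only [PySem.Chars.splitOn.go, List.reverse_cons, pvJoinSnoc, List.isEmpty_reverse]
    simp [List.append_assoc]
  | succ fuel ih =>
    intro l cur acc
    cases l with
    | nil =>
      simp only [PySem.Chars.splitOn.go, List.reverse_cons, pvJoinSnoc, List.isEmpty_reverse]
      simp [List.append_assoc]
    | cons ch rest =>
      by_cases hp : sep.isPrefixOf (ch :: rest) = true
      · have hstep : PySem.Chars.splitOn.go sep (fuel+1) (ch :: rest) cur acc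
            = PySem.Chars.splitOn.go sep fuel (List.drop sep.length (ch :: rest)) [] (cur.reverse :: acc) := by
          simp [PySem.Chars.splitOn.go, hp]
        rw [hstep, ih]
        obtain ⟨t, ht⟩ := List.isPrefixOf_iff_prefix.mp hp
        simp only [List.reverse_cons, pvJoinSnoc, List.isEmpty_reverse, List.isEmpty_cons,
          List.reverse_nil]
        rw [← ht, List.drop_left]
        simp [List.append_assoc]
      · have hstep : PySem.Chars.splitOn.go sep (fuel+1) (ch :: rest) cur acc
            = PySem.Chars.splitOn.go sep fuel rest (ch :: cur) acc := by
          simp [PySem.Chars.splitOn.go, hp]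
        rw [hstep, ih]
        simp [List.append_assoc]

lemma pvRoundtrip (s sep : List Char) :
    PySem.Chars.join sep (PySem.Chars.splitOn s sep) = s := by
  unfold PySem.Chars.splitOn
  rw [pvGoInv]
  simp [PySem.Chars.join_nil]

lemma pvReconstruct (c v s d r : String)
    (h : PySem.Str.split? c " , " = some [v, s, d, r]) :
    c.toList = v.toList ++ " , ".toList ++ (PySem.Str.join " , " [s, d, r]).toList := by
  have hsep : ((" , " : String).toList).isEmpty = false := by decide
  have h' : Option.map (List.map String.ofList)
      (PySem.Chars.split? c.toList (" , " : String).toList) = some [v, s, d, r] := h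
  have hsp : PySem.Chars.split? c.toList (" , " : String).toList
      = some (PySem.Chars.splitOn c.toList (" , " : String).toList) := by
    unfold PySem.Chars.split?
    simp [hsep]
  rw [hsp] at h'
  simp only [Option.map_some, Option.some.injEq] at h'
  have h3 : PySem.Chars.splitOn c.toList (" , " : String).toList
      = [v.toList, s.toList, d.toList, r.toList] := by
    have h2 := congrArg (List.map String.toList) h'
    simpa [List.map_map, Function.comp_def, String.toList_ofList] using h2
  have h4 := pvRoundtrip c.toList (" , " : String).toList
  rw [h3] at h4
  rw [PySem.Str.toList_join, ← h4, PySem.Chars.join_cons_cons]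
  simp

lemma pvParse_eq_some (a v w : String) (h : pvParse a = some (v, w)) :
    ∃ s d r, PySem.Str.split? a " , " = some [v, s, d, r]
      ∧ w = PySem.Str.join " , " [s, d, r] := by
  have h0 := h
  unfold pvParse at h0
  rcases hs : PySem.Str.split? a " , " with _ | ⟨_ | ⟨v', _ | ⟨s, _ | ⟨d, _ | ⟨r, _ | ⟨x, t⟩⟩⟩⟩⟩⟩ <;>
    rw [hs] at h0
  · exact absurd h0 (by simp)
  · exact absurd h0 (by simp)
  · exact absurd h0 (by simp)
  · exact absurd h0 (by simp)
  · exact absurd h0 (by simp)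
  · have h1 := Option.some.inj h0
    obtain ⟨hv, hw⟩ := Prod.mk.inj h1
    refine ⟨s, d, r, ?_, hw.symm⟩
    rw [hv]
  · exact absurd h0 (by simp)

lemma pvParseInj (a a' : String) (p : String × String)
    (h : p ∈ pvParse a) (h' : p ∈ pvParse a') : a = a' := by
  obtain ⟨s, d, r, hs, hj⟩ := pvParse_eq_some a p.1 p.2 (by
    rw [Option.mem_def] at h; rw [h])
  obtain ⟨s', d', r', hs', hj'⟩ := pvParse_eq_some a' p.1 p.2 (by
    rw [Option.mem_def] at h'; rw [h'])
  have e1 := pvReconstruct a p.1 s d r hs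
  have e2 := pvReconstruct a' p.1 s' d' r' hs'
  rw [← String.toList_inj]
  rw [e1, e2, ← hj, ← hj']

lemma pvAddSel_eq_some (c r : String) :
    pvAddSel c = some r ↔ pvParse c = some ("add", r) := by
  unfold pvAddSel
  rcases hp : pvParse c with _ | ⟨v, w⟩
  · simp
  · by_cases hv : v = "add"
    · subst hv; simp
    · simp [hv]

lemma pvAddKeys_cons_add (c w : String) (E : List String) (hp : pvParse c = some ("add", w)) :
    pvAddKeys (c :: E) = w :: pvAddKeys E := by
  have hsel : pvAddSel c = some w := (pvAddSel_eq_some c w).mpr hp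
  unfold pvAddKeys
  rw [List.filterMap_cons_some hsel]

lemma pvAddKeys_cons_skip (c : String) (E : List String)
    (h : ∀ w, pvParse c ≠ some ("add", w)) : pvAddKeys (c :: E) = pvAddKeys E := by
  have hsel : pvAddSel c = none := by
    unfold pvAddSel
    rcases hp : pvParse c with _ | ⟨v, w⟩
    · rfl
    · by_cases hv : v = "add"
      · subst hv; exact absurd hp (h w)
      · simp [hv]
  unfold pvAddKeys
  rw [List.filterMap_cons_none hsel]

lemma pvAddKeys_iff (r : String) (E : List String) :
    r ∈ pvAddKeys E ↔ ("add", r) ∈ E.filterMap pvParse := by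
  simp only [pvAddKeys, List.mem_filterMap, pvAddSel_eq_some]

lemma pvHasDelCons (r : String) (c : String) (E : List String) :
    pvHasDel r (c :: E) = ((pvParse c == some ("delete", r)) || pvHasDel r E) := by
  simp [pvHasDel]

lemma pvHasDelCons_some (c v w r : String) (E : List String) (hp : pvParse c = some (v, w)) :
    pvHasDel r (c :: E) = ((v == "delete" && w == r) || pvHasDel r E) := by
  rw [pvHasDelCons, hp, pvSomeBeq, pvPairBeq]

lemma pvHasDelCons_none (c r : String) (E : List String) (hp : pvParse c = none) :
    pvHasDel r (c :: E) = pvHasDel r E := by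
  rw [pvHasDelCons, hp]
  rfl

lemma pvHasDel_iff (r : String) (E : List String) :
    pvHasDel r E = true ↔ ("delete", r) ∈ E.filterMap pvParse := by
  rw [pvHasDel, List.any_eq_true]
  simp only [List.mem_filterMap, beq_iff_eq]
-- explicit values of one A-step
lemma pvApplyA_add_mem (S : List String) (c w : String) (hp : pvParse c = some ("add", w))
    (hc : PySem.Set.contains S w = true) : pvApplyA S c = S := by
  rw [pvApplyA_of_parse_some S c "add" w hp, if_neg (by rw [hc]; simp), if_neg (by simp)]

lemma pvApplyA_add_new (S : List String) (c w : String) (hp : pvParse c = some ("add", w))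
    (hmem : w ∉ S) : pvApplyA S c = S ++ [w] := by
  have hc : PySem.Set.contains S w = false := by
    cases hcs : PySem.Set.contains S w
    · rfl
    · exact absurd ((PySem.Set.contains_iff S w).mp hcs) hmem
  rw [pvApplyA_of_parse_some S c "add" w hp, if_pos (by rw [hc]; simp)]
  exact PySem.Set.add_of_not_mem hmem

lemma pvApplyA_del_mem (S : List String) (c w : String) (hp : pvParse c = some ("delete", w))
    (hmem : w ∈ S) : pvApplyA S c = S.filter (fun y => !(y == w)) := by
  have hc : PySem.Set.contains S w = true := (PySem.Set.contains_iff S w).mpr hmem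
  rw [pvApplyA_of_parse_some S c "delete" w hp, if_neg (by simp),
    if_pos (by rw [hc]; simp), PySem.Set.remove?_of_mem hmem]
  rfl

lemma pvApplyA_del_out (S : List String) (c w : String) (hp : pvParse c = some ("delete", w))
    (hmem : w ∉ S) : pvApplyA S c = S := by
  have hc : PySem.Set.contains S w = false := by
    cases hcs : PySem.Set.contains S w
    · rfl
    · exact absurd ((PySem.Set.contains_iff S w).mp hcs) hmem
  rw [pvApplyA_of_parse_some S c "delete" w hp, if_neg (by simp), if_neg (by rw [hc]; simp)]

lemma pvApplyA_other (S : List String) (c v w : String) (hp : pvParse c = some (v, w))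
    (hv : ¬v = "add") (hdv : ¬v = "delete") : pvApplyA S c = S := by
  rw [pvApplyA_of_parse_some S c v w hp, if_neg (by simp [hv]), if_neg (by simp [hdv])]

lemma pvApplyA_del_eq_filter (S : List String) (c w : String) (hp : pvParse c = some ("delete", w)) :
    pvApplyA S c = S.filter (fun y => !(y == w)) := by
  by_cases hmem : w ∈ S
  · exact pvApplyA_del_mem S c w hp hmem
  · rw [pvApplyA_del_out S c w hp hmem]
    have : ∀ y ∈ S, (!(y == w)) = true := by
      intro y hy
      have : ¬y = w := fun e => hmem (e ▸ hy)
      simp [this]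
    rw [List.filter_eq_self.mpr this]

lemma pvApplyA_mem_other (S : List String) (c v w x : String)
    (hp : pvParse c = some (v, w)) (hx : x ≠ w) : x ∈ pvApplyA S c ↔ x ∈ S := by
  by_cases hv : v = "add"
  · subst hv
    by_cases hmem : w ∈ S
    · rw [pvApplyA_add_mem S c w hp ((PySem.Set.contains_iff S w).mpr hmem)]
    · rw [pvApplyA_add_new S c w hp hmem]
      simp [hx]
  · by_cases hdv : v = "delete"
    · subst hdv
      rw [pvApplyA_del_eq_filter S c w hp]
      simp [List.mem_filter, hx]
    · rw [pvApplyA_other S c v w hp hv hdv]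

lemma pvApplyA_mem_del (S : List String) (c w x : String)
    (hp : pvParse c = some ("delete", w)) : x ∈ pvApplyA S c ↔ x ∈ S ∧ x ≠ w := by
  rw [pvApplyA_del_eq_filter S c w hp]
  simp [List.mem_filter]

-- ---- A-side: the fold is surviving originals ++ appended elements ----

lemma pvL1step (S : List String) (c : String) (E : List String) :
    (pvApplyA S c).filter (fun r => !pvHasDel r E) ++ pvAppends (pvApplyA S c) E
      = S.filter (fun r => !pvHasDel r (c :: E)) ++ pvAppends S (c :: E) := by
  rcases hp : pvParse c with _ | ⟨v, w⟩
  · rw [pvApplyA_of_parse_none S c hp]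
    simp only [pvAppends, hp, List.nil_append, pvApplyA_of_parse_none S c hp]
    congr 1
    apply List.filter_congr
    intro a _
    rw [pvHasDelCons_none c a E hp]
  · have hfilterEq : S.filter (fun r => !pvHasDel r (c :: E))
        = S.filter (fun r => !((v == "delete" && w == r) || pvHasDel r E)) := by
      apply List.filter_congr
      intro a _
      rw [pvHasDelCons_some c v w a E hp]
    rw [hfilterEq]
    by_cases hv : v = "add"
    · subst hv
      have hfe : S.filter (fun r => !((("add" : String) == "delete" && w == r) || pvHasDel r E))
          = S.filter (fun r => !pvHasDel r E) := by
        apply List.filter_congr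
        intro a _
        simp
      rw [hfe]
      simp only [pvAppends, hp]
      by_cases hmem : w ∈ S
      · have hc : PySem.Set.contains S w = true := (PySem.Set.contains_iff S w).mpr hmem
        rw [pvApplyA_add_mem S c w hp hc, if_neg (by rw [hc]; simp)]
        simp
      · have hc : PySem.Set.contains S w = false := by
          cases hcs : PySem.Set.contains S w
          · rfl
          · exact absurd ((PySem.Set.contains_iff S w).mp hcs) hmem
        rw [pvApplyA_add_new S c w hp hmem, List.filter_append]
        by_cases hd : pvHasDel w E = true
        · rw [if_neg (by rw [hc, hd]; simp)]
          simp [hd]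
        · have hd' : pvHasDel w E = false := by
            cases hds : pvHasDel w E
            · rfl
            · exact absurd hds hd
          rw [if_pos (by rw [hc, hd']; simp)]
          simp [hd']
    · by_cases hdv : v = "delete"
      · subst hdv
        have hfe : S.filter (fun r => !((("delete" : String) == "delete" && w == r) || pvHasDel r E))
            = (S.filter (fun y => !(y == w))).filter (fun r => !pvHasDel r E) := by
          rw [List.filter_filter]
          apply List.filter_congr
          intro a _
          by_cases haw : a = w
          · subst haw; simp
          · have h1 : (a == w) = false := by simp [haw]
            have h2 : (w == a) = false := beq_eq_false_iff_ne.mpr (fun e => haw (Eq.symm e))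
            simp [h1, h2]
        rw [hfe, ← pvApplyA_del_eq_filter S c w hp]
        simp only [pvAppends, hp]
        rw [if_neg (by simp)]
        simp
      · have hfe : S.filter (fun r => !((v == "delete" && w == r) || pvHasDel r E))
            = S.filter (fun r => !pvHasDel r E) := by
          apply List.filter_congr
          intro a _
          have h1 : (v == "delete") = false := by simp [hdv]
          simp [h1]
        rw [hfe, pvApplyA_other S c v w hp hv hdv]
        simp only [pvAppends, hp]
        rw [if_neg (by simp [hv]), pvApplyA_other S c v w hp hv hdv]
        simp

lemma pvL1 (E : List String) : ∀ S : List String,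
    E.foldl pvApplyA S = S.filter (fun r => !pvHasDel r E) ++ pvAppends S E := by
  induction E with
  | nil => intro S; simp [pvAppends, pvHasDel]
  | cons c E ih =>
    intro S
    rw [List.foldl_cons, ih (pvApplyA S c), pvL1step]
-- ---- dedup absorption for B's scan ----

def pvAbs (st : PySem.Dict String Bool × PySem.Set String) (c : String) : Prop :=
  ∀ v r, pvParse c = some (v, r) →
    (v = "add" → st.1.contains r = true) ∧ (v = "delete" → PySem.Set.contains st.2 r = true)

lemma pvScanAbsorbed (st : PySem.Dict String Bool × PySem.Set String) (c : String)
    (h : pvAbs st c) : pvScanB st c = st := by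
  rcases hp : pvParse c with _ | ⟨v, w⟩
  · exact pvScanB_of_parse_none st c hp
  · rw [pvScanB_of_parse_some st c v w hp]
    obtain ⟨h1, h2⟩ := h v w hp
    by_cases hv : v = "add"
    · rw [if_neg (by rw [h1 hv]; simp), if_neg (by simp [hv ▸ (by decide : ¬("add" : String) = "delete")])]
    · by_cases hdv : v = "delete"
      · have hmem : w ∈ st.2 := (PySem.Set.contains_iff st.2 w).mp (h2 hdv)
        rw [if_neg (by simp [hv]), if_pos (by simp [hdv]), PySem.Set.add_of_mem hmem]
      · rw [if_neg (by simp [hv]), if_neg (by simp [hdv])]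

lemma pvScanFaMono (st : PySem.Dict String Bool × PySem.Set String) (c' : String) (r : String)
    (h : st.1.contains r = true) : (pvScanB st c').1.contains r = true := by
  rcases hp : pvParse c' with _ | ⟨v, w⟩
  · rw [pvScanB_of_parse_none st c' hp]; exact h
  · rw [pvScanB_of_parse_some st c' v w hp]
    split_ifs <;> simp [PySem.Dict.contains_insert, h]

lemma pvScanFdMono (st : PySem.Dict String Bool × PySem.Set String) (c' : String) (r : String)
    (h : r ∈ st.2) : r ∈ (pvScanB st c').2 := by
  rcases hp : pvParse c' with _ | ⟨v, w⟩
  · rw [pvScanB_of_parse_none st c' hp]; exact h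
  · rw [pvScanB_of_parse_some st c' v w hp]
    split_ifs <;> simp [PySem.Set.mem_add, h]

lemma pvScanMono (st : PySem.Dict String Bool × PySem.Set String) (c c' : String)
    (h : pvAbs st c) : pvAbs (pvScanB st c') c := by
  intro v r hpr
  obtain ⟨h1, h2⟩ := h v r hpr
  refine ⟨fun hv => pvScanFaMono st c' r (h1 hv), fun hv => ?_⟩
  have hm := (PySem.Set.contains_iff st.2 r).mp (h2 hv)
  exact (PySem.Set.contains_iff _ r).mpr (pvScanFdMono st c' r hm)

lemma pvScanSelf (st : PySem.Dict String Bool × PySem.Set String) (c : String) :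
    pvAbs (pvScanB st c) c := by
  intro v r hpr
  rw [pvScanB_of_parse_some st c v r hpr]
  constructor
  · intro hv; subst hv
    by_cases hfa : st.1.contains r = true
    · rw [if_neg (by rw [hfa]; simp), if_neg (by simp)]
      exact hfa
    · have hfa' : st.1.contains r = false := by
        cases hf : st.1.contains r
        · rfl
        · exact absurd hf hfa
      rw [if_pos (by rw [hfa']; simp)]
      simp [PySem.Dict.contains_insert]
  · intro hv; subst hv
    rw [if_neg (by simp), if_pos (by simp)]
    rw [PySem.Set.contains_iff]
    exact (PySem.Set.mem_add st.2 r r).mpr (Or.inr rfl)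

lemma pvScanDedup (cs : List String) : ∀ (st : PySem.Dict String Bool × PySem.Set String)
    (seen : List String), (∀ c ∈ seen, pvAbs st c) →
    cs.foldl pvScanB st = (pvDedupFrom seen cs).foldl pvScanB st := by
  induction cs with
  | nil => intro st seen _; simp [pvDedupFrom]
  | cons c cs ih =>
    intro st seen hseen
    by_cases h : PySem.Set.contains seen c = true
    · have habs : pvScanB st c = st :=
        pvScanAbsorbed st c (hseen c ((PySem.Set.contains_iff seen c).mp h))
      simp only [pvDedupFrom, h, if_pos, List.foldl_cons, habs]
      exact ih st seen hseen
    · simp only [pvDedupFrom, h, Bool.false_eq_true, if_neg, List.foldl_cons]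
      refine ih (pvScanB st c) (PySem.Set.add seen c) ?_
      intro c' hc'
      rcases (PySem.Set.mem_add seen c c').mp hc' with h' | h'
      · exact pvScanMono st c' c (hseen c' h')
      · rw [h']; exact pvScanSelf st c

-- ---- characterizations of the scan state ----

lemma pvFdChar (E : List String) : ∀ (st : PySem.Dict String Bool × PySem.Set String) (r : String),
    r ∈ (E.foldl pvScanB st).2 ↔ r ∈ st.2 ∨ pvHasDel r E = true := by
  induction E with
  | nil => intro st r; simp [pvHasDel]
  | cons c E ih =>
    intro st r
    rw [List.foldl_cons, ih]
    rcases hp : pvParse c with _ | ⟨v, w⟩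
    · rw [pvScanB_of_parse_none st c hp, pvHasDelCons_none c r E hp]
    · rw [pvHasDelCons_some c v w r E hp, pvScanB_of_parse_some st c v w hp]
      by_cases hv : v = "add"
      · subst hv
        by_cases hfa : st.1.contains w = true
        · rw [if_neg (by rw [hfa]; simp), if_neg (by simp)]
          simp
        · have hf' : st.1.contains w = false := by
            cases hfr : st.1.contains w
            · rfl
            · exact absurd hfr hfa
          rw [if_pos (by rw [hf']; simp)]
          simp
      · by_cases hdv : v = "delete"
        · subst hdv
          rw [if_neg (by simp), if_pos (by simp)]
          by_cases hrw : r = w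
          · subst hrw
            simp [PySem.Set.mem_add]
          · have hwr : (w == r) = false := beq_eq_false_iff_ne.mpr (fun e => hrw (Eq.symm e))
            simp [PySem.Set.mem_add, hrw, hwr]
        · have h1 : (v == "delete") = false := by simp [hdv]
          rw [if_neg (by simp [hv]), if_neg (by simp [hdv])]
          simp [h1]

lemma pvFaList_cons_add (fd : PySem.Set String) (c w : String) (E : List String)
    (hp : pvParse c = some ("add", w)) :
    pvFaList fd (c :: E) = (w, PySem.Set.contains fd w) :: pvFaList fd E := by
  simp only [pvFaList, hp]
  rw [if_pos (by simp)]

lemma pvFaList_cons_del (fd : PySem.Set String) (c w : String) (E : List String)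
    (hp : pvParse c = some ("delete", w)) :
    pvFaList fd (c :: E) = pvFaList (PySem.Set.add fd w) E := by
  simp only [pvFaList, hp]
  rw [if_neg (by simp), if_pos (by simp)]

lemma pvFaList_cons_other (fd : PySem.Set String) (c v w : String) (E : List String)
    (hp : pvParse c = some (v, w)) (hv : ¬v = "add") (hdv : ¬v = "delete") :
    pvFaList fd (c :: E) = pvFaList fd E := by
  simp only [pvFaList, hp]
  rw [if_neg (by simp [hv]), if_neg (by simp [hdv])]

lemma pvFaList_cons_none (fd : PySem.Set String) (c : String) (E : List String)
    (hp : pvParse c = none) : pvFaList fd (c :: E) = pvFaList fd E := by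
  simp only [pvFaList, hp]

lemma pvFaKeys (E : List String) : ∀ fd : PySem.Set String,
    (pvFaList fd E).map Prod.fst = pvAddKeys E := by
  induction E with
  | nil => intro fd; simp [pvFaList, pvAddKeys]
  | cons c E ih =>
    intro fd
    rcases hp : pvParse c with _ | ⟨v, w⟩
    · rw [pvFaList_cons_none fd c E hp, pvAddKeys_cons_skip c E (by simp [hp]), ih]
    · by_cases hv : v = "add"
      · subst hv
        rw [pvFaList_cons_add fd c w E hp, pvAddKeys_cons_add c w E hp]
        simp [ih fd]
      · by_cases hdv : v = "delete"
        · subst hdv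
          rw [pvFaList_cons_del fd c w E hp,
            pvAddKeys_cons_skip c E (by simp [hp]), ih]
        · rw [pvFaList_cons_other fd c v w E hp hv hdv,
            pvAddKeys_cons_skip c E (by simp [hp, hv]), ih]

lemma pvFaChar (E : List String) : ∀ (fa : PySem.Dict String Bool) (fd : PySem.Set String),
    (∀ r ∈ pvAddKeys E, fa.contains r = false) → (pvAddKeys E).Nodup →
    (E.foldl pvScanB (fa, fd)).1.items = fa.items ++ pvFaList fd E := by
  induction E with
  | nil => intro fa fd _ _; simp [pvFaList]
  | cons c E ih =>
    intro fa fd hfresh hnd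
    rw [List.foldl_cons]
    rcases hp : pvParse c with _ | ⟨v, w⟩
    · rw [pvScanB_of_parse_none (fa, fd) c hp, pvFaList_cons_none fd c E hp]
      rw [pvAddKeys_cons_skip c E (by simp [hp])] at hfresh hnd
      exact ih fa fd hfresh hnd
    · rw [pvScanB_of_parse_some (fa, fd) c v w hp]
      by_cases hv : v = "add"
      · subst hv
        rw [pvAddKeys_cons_add c w E hp] at hfresh hnd
        have hfw : fa.contains w = false := hfresh w (List.mem_cons_self ..)
        rw [if_pos (by rw [hfw]; simp)]
        have htail : ∀ r ∈ pvAddKeys E, ((fa.insert w (PySem.Set.contains fd w)).contains r) = false := by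
          intro r hr
          rw [PySem.Dict.contains_insert]
          have hne : ¬r = w := fun e => (List.nodup_cons.mp hnd).1 (e ▸ hr)
          have hfr : fa.contains r = false := hfresh r (List.mem_cons_of_mem _ hr)
          simp [hne, hfr]
        rw [ih _ fd htail (List.nodup_cons.mp hnd).2,
          PySem.Dict.items_insert_of_not_contains fa _ hfw,
          pvFaList_cons_add fd c w E hp]
        simp
      · by_cases hdv : v = "delete"
        · subst hdv
          rw [if_neg (by simp), if_pos (by simp), pvFaList_cons_del fd c w E hp]
          rw [pvAddKeys_cons_skip c E (by simp [hp])] at hfresh hnd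
          exact ih fa (PySem.Set.add fd w) hfresh hnd
        · rw [if_neg (by simp [hv]), if_neg (by simp [hdv]),
            pvFaList_cons_other fd c v w E hp hv hdv]
          rw [pvAddKeys_cons_skip c E (by simp [hp, hv])] at hfresh hnd
          exact ih fa fd hfresh hnd
lemma pvAppends_cons_emit (S : List String) (c w : String) (E : List String)
    (hp : pvParse c = some ("add", w)) (hd : pvHasDel w E = false)
    (hmem : w ∉ S) : pvAppends S (c :: E) = w :: pvAppends (S ++ [w]) E := by
  have hc : PySem.Set.contains S w = false := by
    cases hcs : PySem.Set.contains S w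
    · rfl
    · exact absurd ((PySem.Set.contains_iff S w).mp hcs) hmem
  simp only [pvAppends, hp]
  rw [if_pos (by rw [hd, hc]; simp), pvApplyA_add_new S c w hp hmem]
  rfl

lemma pvAppends_cons_skip (S : List String) (c : String) (E : List String)
    (h : ∀ w, pvParse c = some ("add", w) → (pvHasDel w E = true ∨ w ∈ S)) :
    pvAppends S (c :: E) = pvAppends (pvApplyA S c) E := by
  rcases hp : pvParse c with _ | ⟨v, w⟩
  · simp only [pvAppends, hp, List.nil_append]
  · by_cases hv : v = "add"
    · subst hv
      simp only [pvAppends, hp]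
      rcases h w hp with hd | hmem
      · rw [if_neg (by rw [hd]; simp)]
        rfl
      · have hc : PySem.Set.contains S w = true := (PySem.Set.contains_iff S w).mpr hmem
        rw [if_neg (by rw [hc]; simp)]
        rfl
    · simp only [pvAppends, hp]
      rw [if_neg (by simp [hv])]
      rfl

-- ---- the filtered first_add items are exactly A's appended elements ----

lemma pvAppEq (rdfs : List String) (fdF : PySem.Set String) (E : List String) :
    ∀ (S : List String) (fd : PySem.Set String),
    (E.filterMap pvParse).Nodup →
    (∀ r ∈ pvAddKeys E, (r ∈ S ↔ r ∈ rdfs ∧ r ∉ fd)) →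
    (∀ r ∈ fd, ("delete", r) ∉ E.filterMap pvParse) →
    (∀ r : String, r ∈ fdF ↔ r ∈ fd ∨ pvHasDel r E = true) →
    ((pvFaList fd E).filter (fun p =>
        p.2 || (!(PySem.Set.contains fdF p.1) && !(PySem.Set.contains rdfs p.1)))).map Prod.fst
      = pvAppends S E := by
  induction E with
  | nil => intro S fd _ _ _ _; simp [pvFaList, pvAppends]
  | cons c E ih =>
    intro S fd hnd hinv hdel hF
    rcases hp : pvParse c with _ | ⟨v, w⟩
    · rw [pvFaList_cons_none fd c E hp,
        pvAppends_cons_skip S c E (by intro w hw; rw [hp] at hw; cases hw),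
        pvApplyA_of_parse_none S c hp]
      rw [pvAddKeys_cons_skip c E (by simp [hp])] at hinv
      refine ih S fd (by simpa [List.filterMap_cons, hp] using hnd) hinv ?_ ?_
      · intro r hr
        have := hdel r hr
        simpa [List.filterMap_cons, hp] using this
      · intro r
        rw [hF r, pvHasDelCons_none c r E hp]
    · have hpairs : (c :: E).filterMap pvParse = (v, w) :: E.filterMap pvParse := by
        simp [List.filterMap_cons, hp]
      rw [hpairs] at hnd hdel
      have hndE := (List.nodup_cons.mp hnd).2
      have hhead := (List.nodup_cons.mp hnd).1
      by_cases hv : v = "add"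
      · subst hv
        rw [pvAddKeys_cons_add c w E hp] at hinv
        have hne : ∀ r ∈ pvAddKeys E, r ≠ w := by
          intro r hr hrw
          subst hrw
          exact hhead ((pvAddKeys_iff r E).mp hr)
        have hwa : w ∈ S ↔ w ∈ rdfs ∧ w ∉ fd := hinv w (List.mem_cons_self ..)
        have hFE : ∀ r : String, r ∈ fdF ↔ r ∈ fd ∨ pvHasDel r E = true := by
          intro r
          rw [hF r, pvHasDelCons_some c "add" w r E hp]
          simp
        have hstep : ∀ S' : List String, (∀ r ∈ pvAddKeys E, (r ∈ S' ↔ r ∈ S)) →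
            ((pvFaList fd E).filter (fun p =>
              p.2 || (!(PySem.Set.contains fdF p.1) && !(PySem.Set.contains rdfs p.1)))).map Prod.fst
              = pvAppends S' E := by
          intro S' hS'
          refine ih S' fd hndE ?_
            (fun r hr hm => hdel r hr (List.mem_cons_of_mem _ hm)) hFE
          intro r hr
          rw [hS' r hr]
          exact hinv r (List.mem_cons_of_mem _ hr)
        have hcond : ((PySem.Set.contains fd w)
              || (!(PySem.Set.contains fdF w) && !(PySem.Set.contains rdfs w)))
            = (!pvHasDel w E && !(PySem.Set.contains S w)) := by
          by_cases hfd : w ∈ fd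
          · have h1 : PySem.Set.contains fd w = true := (PySem.Set.contains_iff fd w).mpr hfd
            have hnd2 : pvHasDel w E = false := by
              cases hds : pvHasDel w E
              · rfl
              · exact absurd ((pvHasDel_iff w E).mp hds)
                  (fun hm => hdel w hfd (List.mem_cons_of_mem _ hm))
            have hws : w ∉ S := fun hw => (hwa.mp hw).2 hfd
            have h2 : PySem.Set.contains S w = false := by
              cases hcs : PySem.Set.contains S w
              · rfl
              · exact absurd ((PySem.Set.contains_iff S w).mp hcs) hws
            rw [h1, hnd2, h2]
            simp
          · have h1 : PySem.Set.contains fd w = false := by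
              cases hcs : PySem.Set.contains fd w
              · rfl
              · exact absurd ((PySem.Set.contains_iff fd w).mp hcs) hfd
            have h2 : PySem.Set.contains fdF w = pvHasDel w E := by
              rw [Bool.eq_iff_iff, PySem.Set.contains_iff, hFE w]
              simp [hfd]
            have h3 : PySem.Set.contains S w = PySem.Set.contains rdfs w := by
              rw [Bool.eq_iff_iff, PySem.Set.contains_iff, PySem.Set.contains_iff, hwa]
              simp [hfd]
            rw [h1, h2, h3]
            simp [Bool.and_comm]
        rw [pvFaList_cons_add fd c w E hp]
        by_cases hd : pvHasDel w E = true
        · have hX : (PySem.Set.contains fd w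
              || (!(PySem.Set.contains fdF w) && !(PySem.Set.contains rdfs w))) = false := by
            rw [hcond, hd]
            simp
          rw [List.filter_cons_of_neg (by
            show ¬ ((PySem.Set.contains fd w
              || (!(PySem.Set.contains fdF w) && !(PySem.Set.contains rdfs w))) = true)
            rw [hX]
            exact Bool.false_ne_true)]
          rw [pvAppends_cons_skip S c E (by
            intro w' hw'
            rw [hp] at hw'
            obtain rfl : w' = w := by cases hw'; rfl
            exact Or.inl hd)]
          exact hstep (pvApplyA S c)
            (fun r hr => pvApplyA_mem_other S c "add" w r hp (hne r hr))
        · have hd' : pvHasDel w E = false := by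
            cases hds : pvHasDel w E
            · rfl
            · exact absurd hds hd
          by_cases hmem : w ∈ S
          · have hc : PySem.Set.contains S w = true := (PySem.Set.contains_iff S w).mpr hmem
            have hX : (PySem.Set.contains fd w
                || (!(PySem.Set.contains fdF w) && !(PySem.Set.contains rdfs w))) = false := by
              rw [hcond, hc]
              simp
            rw [List.filter_cons_of_neg (by
              show ¬ ((PySem.Set.contains fd w
                || (!(PySem.Set.contains fdF w) && !(PySem.Set.contains rdfs w))) = true)
              rw [hX]
              exact Bool.false_ne_true)]
            rw [pvAppends_cons_skip S c E (by
              intro w' hw'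
              rw [hp] at hw'
              obtain rfl : w' = w := by cases hw'; rfl
              exact Or.inr hmem)]
            rw [pvApplyA_add_mem S c w hp hc]
            exact hstep S (fun r _ => Iff.rfl)
          · have hc : PySem.Set.contains S w = false := by
              cases hcs : PySem.Set.contains S w
              · rfl
              · exact absurd ((PySem.Set.contains_iff S w).mp hcs) hmem
            have hX : (PySem.Set.contains fd w
                || (!(PySem.Set.contains fdF w) && !(PySem.Set.contains rdfs w))) = true := by
              rw [hcond, hd', hc]
              simp
            rw [List.filter_cons_of_pos (by
              show ((PySem.Set.contains fd w
                || (!(PySem.Set.contains fdF w) && !(PySem.Set.contains rdfs w))) = true)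
              exact hX)]
            rw [pvAppends_cons_emit S c w E hp hd' hmem, List.map_cons]
            have hS' : ∀ r ∈ pvAddKeys E, (r ∈ S ++ [w] ↔ r ∈ S) := by
              intro r hr
              rw [List.mem_append]
              simp [hne r hr]
            rw [hstep (S ++ [w]) hS']
      · have hkeys : pvAddKeys (c :: E) = pvAddKeys E := by
          apply pvAddKeys_cons_skip
          intro w' hw'
          rw [hp] at hw'
          exact hv (by cases hw'; rfl)
        rw [hkeys] at hinv
        rw [pvAppends_cons_skip S c E (by
          intro w' hw'
          rw [hp] at hw'
          exact absurd (show v = "add" by cases hw'; rfl) hv)]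
        by_cases hdv : v = "delete"
        · subst hdv
          rw [pvFaList_cons_del fd c w E hp]
          refine ih (pvApplyA S c) (PySem.Set.add fd w) hndE ?_ ?_ ?_
          · intro r hr
            rw [pvApplyA_mem_del S c w r hp, hinv r hr]
            constructor
            · rintro ⟨⟨h1, h2⟩, h3⟩
              refine ⟨h1, fun hc => ?_⟩
              rcases (PySem.Set.mem_add fd w r).mp hc with hc | hc
              · exact h2 hc
              · exact h3 hc
            · rintro ⟨h1, h2⟩
              exact ⟨⟨h1, fun hc => h2 ((PySem.Set.mem_add fd w r).mpr (Or.inl hc))⟩,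
                fun hc => h2 ((PySem.Set.mem_add fd w r).mpr (Or.inr hc))⟩
          · intro r hr hm
            rcases (PySem.Set.mem_add fd w r).mp hr with h' | h'
            · exact hdel r h' (List.mem_cons_of_mem _ hm)
            · subst h'
              exact hhead hm
          · intro r
            rw [hF r, pvHasDelCons_some c "delete" w r E hp]
            have hb : (((("delete" : String)) == "delete") && (w == r)) = (w == r) := by simp
            rw [hb]
            have hsplit : (((w == r) || pvHasDel r E) = true)
                ↔ (w = r ∨ pvHasDel r E = true) := by simp
            rw [hsplit]
            constructor
            · rintro (h1 | h1 | h1)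
              · exact Or.inl ((PySem.Set.mem_add fd w r).mpr (Or.inl h1))
              · exact Or.inl ((PySem.Set.mem_add fd w r).mpr (Or.inr h1.symm))
              · exact Or.inr h1
            · rintro (h1 | h1)
              · rcases (PySem.Set.mem_add fd w r).mp h1 with h2 | h2
                · exact Or.inl h2
                · exact Or.inr (Or.inl h2.symm)
              · exact Or.inr (Or.inr h1)
        · rw [pvFaList_cons_other fd c v w E hp hv hdv,
            pvApplyA_other S c v w hp hv hdv]
          refine ih S fd hndE hinv
            (fun r hr hm => hdel r hr (List.mem_cons_of_mem _ hm)) ?_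
          intro r
          rw [hF r, pvHasDelCons_some c v w r E hp]
          have h1 : (v == "delete") = false := by simp [hdv]
          simp [h1]

lemma pvAppendsNotKept (E : List String) : ∀ (S : List String) (x : String),
    x ∈ pvAppends S E → x ∉ S ∨ pvHasDel x E = true := by
  induction E with
  | nil => intro S x hx; simp [pvAppends] at hx
  | cons c E ih =>
    intro S x hx
    rcases hp : pvParse c with _ | ⟨v, w⟩
    · rw [pvAppends_cons_skip S c E (by intro w hw; rw [hp] at hw; cases hw),
        pvApplyA_of_parse_none S c hp] at hx
      rcases ih S x hx with h | h
      · exact Or.inl h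
      · right; rw [pvHasDelCons_none c x E hp]; exact h
    · by_cases hv : v = "add"
      · subst hv
        by_cases hd : pvHasDel w E = true
        · rw [pvAppends_cons_skip S c E (by
            intro w' hw'
            rw [hp] at hw'
            obtain rfl : w' = w := by cases hw'; rfl
            exact Or.inl hd)] at hx
          rcases ih _ x hx with h | h
          · by_cases hxw : x = w
            · subst hxw
              right
              rw [pvHasDelCons_some c "add" x x E hp]
              simp [hd]
            · left
              intro hxS
              exact h ((pvApplyA_mem_other S c "add" w x hp hxw).mpr hxS)
          · right
            rw [pvHasDelCons_some c "add" w x E hp]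
            simp [h]
        · have hd' : pvHasDel w E = false := by
            cases hds : pvHasDel w E
            · rfl
            · exact absurd hds hd
          by_cases hmem : w ∈ S
          · rw [pvAppends_cons_skip S c E (by
              intro w' hw'
              rw [hp] at hw'
              obtain rfl : w' = w := by cases hw'; rfl
              exact Or.inr hmem),
              pvApplyA_add_mem S c w hp ((PySem.Set.contains_iff S w).mpr hmem)] at hx
            rcases ih S x hx with h | h
            · exact Or.inl h
            · right; rw [pvHasDelCons_some c "add" w x E hp]; simp [h]
          · rw [pvAppends_cons_emit S c w E hp hd' hmem] at hx
            rcases List.mem_cons.mp hx with rfl | hx'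
            · exact Or.inl hmem
            · rcases ih _ x hx' with h | h
              · by_cases hxw : x = w
                · subst hxw
                  exact Or.inl hmem
                · left
                  intro hxS
                  exact h (by rw [List.mem_append]; exact Or.inl hxS)
              · right; rw [pvHasDelCons_some c "add" w x E hp]; simp [h]
      · rw [pvAppends_cons_skip S c E (by
          intro w' hw'
          rw [hp] at hw'
          exact absurd (show v = "add" by cases hw'; rfl) hv)] at hx
        rcases ih _ x hx with h | h
        · by_cases hdv : v = "delete"
          · subst hdv
            by_cases hxw : x = w
            · subst hxw
              right
              rw [pvHasDelCons_some c "delete" x x E hp]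
              simp
            · left
              intro hxS
              exact h ((pvApplyA_mem_other S c "delete" w x hp hxw).mpr hxS)
          · left
            intro hxS
            exact h (by rw [pvApplyA_other S c v w hp hv hdv]; exact hxS)
        · right; rw [pvHasDelCons_some c v w x E hp]; simp [h]

-- ===== VERDICT (by name: the statement is the Claim_ definition above) =====
theorem update_rdf_graph_spec : Claim_equal_update_rdf_graph := by
  intro rdfs cmds _ _
  simp only [Spec_update_rdf_graph, update_rdf_graph, update_rdf_graph_alt]
  have hdd : PySem.List.dedup cmds = pvDedupFrom [] cmds := pvDedupEq cmds
  set E := pvDedupFrom [] cmds with hE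
  have hNodupE : E.Nodup := by rw [← hdd]; exact PySem.List.nodup_dedup cmds
  have hOps : (E.filterMap pvParse).Nodup :=
    hNodupE.filterMap (fun a a' b hb hb' => pvParseInj a a' b hb hb')
  have hAddEq : pvAddKeys E = (E.filterMap pvParse).filterMap
      (fun p => if p.1 == "add" then some p.2 else none) := by
    rw [List.filterMap_filterMap]
    rfl
  have hAdd : (pvAddKeys E).Nodup := by
    rw [hAddEq]
    refine hOps.filterMap ?_
    intro p p' b hb hb'
    have h1 : p = ("add", b) := by
      rcases p with ⟨pv, pw⟩
      by_cases hv : pv = "add"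
      · subst hv
        simp at hb
        simp [hb]
      · simp [hv] at hb
    have h2 : p' = ("add", b) := by
      rcases p' with ⟨pv, pw⟩
      by_cases hv : pv = "add"
      · subst hv
        simp at hb'
        simp [hb']
      · simp [hv] at hb'
    rw [h1, h2]
  have hscan : cmds.foldl pvScanB (PySem.Dict.empty, PySem.Set.empty)
      = E.foldl pvScanB (PySem.Dict.empty, PySem.Set.empty) :=
    pvScanDedup cmds _ [] (by intro c hc; simp at hc)
  rw [hdd, hscan]
  set st := E.foldl pvScanB (PySem.Dict.empty, PySem.Set.empty) with hst
  have hfd : ∀ r : String, r ∈ st.2 ↔ pvHasDel r E = true := by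
    intro r
    rw [hst, pvFdChar]
    simp [PySem.Set.empty]
  have hcontains : ∀ r : String, PySem.Set.contains st.2 r = pvHasDel r E := by
    intro r
    rw [Bool.eq_iff_iff, PySem.Set.contains_iff]
    exact hfd r
  have hitems : st.1.items = pvFaList PySem.Set.empty E := by
    rw [hst, pvFaChar E PySem.Dict.empty PySem.Set.empty
      (fun r _ => PySem.Dict.contains_empty r) hAdd]
    simp [PySem.Dict.empty]
  have happ : ((pvFaList PySem.Set.empty E).filter (fun p =>
      p.2 || (!(PySem.Set.contains st.2 p.1) && !(PySem.Set.contains rdfs p.1)))).map Prod.fst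
      = pvAppends rdfs E := by
    apply pvAppEq rdfs st.2 E rdfs PySem.Set.empty hOps
    · intro r _
      simp [PySem.Set.empty]
    · intro r hr
      simp [PySem.Set.empty] at hr
    · intro r
      rw [hfd r]
      simp [PySem.Set.empty]
  have hkept : PySem.Set.diff rdfs st.2 = rdfs.filter (fun r => !pvHasDel r E) := by
    unfold PySem.Set.diff
    apply List.filter_congr
    intro a _
    rw [hcontains a]
  have hAppNodup : (pvAppends rdfs E).Nodup := by
    rw [← happ]
    have hsub : List.Sublist (((pvFaList PySem.Set.empty E).filter (fun p =>
        p.2 || (!(PySem.Set.contains st.2 p.1) && !(PySem.Set.contains rdfs p.1)))).map Prod.fst)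
        ((pvFaList PySem.Set.empty E).map Prod.fst) :=
      List.Sublist.map Prod.fst List.filter_sublist
    rw [pvFaKeys E PySem.Set.empty] at hsub
    exact hAdd.sublist hsub
  have hdisj : ∀ x ∈ pvAppends rdfs E, x ∉ rdfs.filter (fun r => !pvHasDel r E) := by
    intro x hx hmem
    rcases pvAppendsNotKept E rdfs x hx with h | h
    · exact h (List.mem_filter.mp hmem).1
    · have h2 := (List.mem_filter.mp hmem).2
      rw [h] at h2
      simp at h2
  rw [pvL1 E rdfs, hitems, happ, hkept,
    PySem.Set.update_eq_append_of_disjoint _ _ hAppNodup hdisj]
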